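-- pv_equiv track=rewrite | github.com/Arsen1302/Code-copy-detector | TestData/solutions/problem_1651_4.py | solution_1651_4
-- ===== SOURCE A (Python) =====
-- from typing import List
--
-- def solution_1651_4(nums: List[int], queries: List[int]) -> List[int]:
--
--     numsSorted = sorted(nums)
--     res = []
--
--     for q in queries:
--         total = 0
--         count = 0
--         for num in numsSorted:
--             total += num
--             count += 1
--             if total > q:
--                 count -= 1
--                 break
--         res.append(count)
--
--     return res
-- ===== SOURCE B (Python) =====
-- from typing import List
--
-- def solution_1651_4(nums: List[int], queries: List[int]) -> List[int]:
--     # Offline two-pointer sweep: answer the queries in increasing order, so the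
--     # prefix pointer over the sorted nums only ever moves forward.
--     nums_sorted = sorted(nums)
--     n = len(nums_sorted)
--     res = [0] * len(queries)
--     order = sorted(range(len(queries)), key=lambda i: queries[i])
--     total = 0
--     count = 0
--     for i in order:
--         q = queries[i]
--         while count < n and total + nums_sorted[count] <= q:
--             total += nums_sorted[count]
--             count += 1
--         res[i] = count
--     return res
-- ===== Notes on version B (the rewrite author's own statement) =====
-- stated objective: faster
-- what changed: B answers the queries offline in increasing order with a single forward-moving prefix pointer over sorted(nums), instead of A's fresh linear scan with re-accumulated sums for every query.
import Mathlib
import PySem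

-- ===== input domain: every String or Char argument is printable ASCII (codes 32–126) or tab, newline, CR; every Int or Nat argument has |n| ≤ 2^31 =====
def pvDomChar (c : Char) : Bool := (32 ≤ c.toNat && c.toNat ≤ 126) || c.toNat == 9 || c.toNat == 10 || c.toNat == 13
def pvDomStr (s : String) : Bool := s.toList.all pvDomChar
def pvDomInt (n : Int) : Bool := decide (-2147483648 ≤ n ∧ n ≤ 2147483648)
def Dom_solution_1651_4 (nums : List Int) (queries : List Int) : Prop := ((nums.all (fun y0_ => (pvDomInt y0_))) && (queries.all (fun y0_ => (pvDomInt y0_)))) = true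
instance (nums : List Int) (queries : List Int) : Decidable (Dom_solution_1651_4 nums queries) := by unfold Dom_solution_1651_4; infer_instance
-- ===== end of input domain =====

-- B answers the queries offline in increasing order with one forward-moving prefix pointer
-- over sorted(nums) (objective: faster, asymptotic).

-- ===== PORT A =====
-- inner 'for num in numsSorted' loop with state (total, count), break on total > q
def pvALoop (q : Int) : List Int → Int → Int → Int
  | [], _, count => count
  | num :: rest, total, count =>
      let total' := total + num
      let count' := count + 1
      if total' > q then count' - 1
      else pvALoop q rest total' count'

def solution_1651_4 (nums : List Int) (queries : List Int) : List Int :=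
  let numsSorted := PySem.List.sorted nums (fun x => x) false
  queries.foldl (fun res q => res ++ [pvALoop q numsSorted 0 0]) []

-- ===== PORT B =====
-- the inner 'while count < n and total + nums_sorted[count] <= q' loop;
-- fuel bounds the iteration count (totality device only: count increases each step and the
-- loop runs while count < n, so fuel = n never runs out before the condition fails)
def pvSweep (ns : List Int) (q : Int) : Nat → Int → Int → Int × Int
  | 0, total, count => (total, count)
  | fuel + 1, total, count =>
      if count < (ns.length : Int) ∧ total + PySem.List.pyGetD ns count 0 ≤ q then
        pvSweep ns q fuel (total + PySem.List.pyGetD ns count 0) (count + 1)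
      else (total, count)

-- 'res[i] = count' is List.set i.toNat: i comes from range(len(queries)), always in range
def solution_1651_4_alt (nums : List Int) (queries : List Int) : List Int :=
  let numsSorted := PySem.List.sorted nums (fun x => x) false
  let n := numsSorted.length
  let order := PySem.List.sorted (PySem.List.pyRange 0 (queries.length : Int) 1)
                 (fun i => PySem.List.pyGetD queries i 0) false
  let final := order.foldl (fun (st : List Int × Int × Int) i =>
      let q := PySem.List.pyGetD queries i 0
      let s := pvSweep numsSorted q n st.2.1 st.2.2
      (st.1.set i.toNat s.2, s.1, s.2)) (List.replicate queries.length (0 : Int), 0, 0)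
  final.1

-- ===== PRECONDITION & SPEC =====
def Spec_solution_1651_4 (nums : List Int) (queries : List Int) (out : List Int) : Prop := out = solution_1651_4_alt nums queries
instance (nums : List Int) (queries : List Int) (out : List Int) : Decidable (Spec_solution_1651_4 nums queries out) := by unfold Spec_solution_1651_4; infer_instance

-- ===== CLAIM (what is proved, stated in full; the proofs are below) =====
def Claim_equal_solution_1651_4 : Prop := ∀ (nums : List Int) (queries : List Int), Dom_solution_1651_4 nums queries → Spec_solution_1651_4 nums queries (solution_1651_4 nums queries)

-- ===== LEMMAS AND PROOFS =====

-- proof-side structural version of B's while loop (consumes the not-yet-taken suffix)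
def pvAux (q : Int) : List Int → Int → Int → Int × Int
  | [], t, c => (t, c)
  | x :: r, t, c => if t + x ≤ q then pvAux q r (t + x) (c + 1) else (t, c)

lemma pvAux_count_ge (q : Int) (xs : List Int) (t c : Int) :
    c ≤ (pvAux q xs t c).2 := by
  induction xs generalizing t c with
  | nil => simp [pvAux]
  | cons x r ih =>
    simp only [pvAux]
    split_ifs with h
    · have := ih (t + x) (c + 1); omega
    · simp

-- A's loop result from any count offset
lemma pvALoop_shift (q : Int) (xs : List Int) (total count : Int) :
    pvALoop q xs total count = count + pvALoop q xs total 0 := by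
  induction xs generalizing total count with
  | nil => simp [pvALoop]
  | cons x rest ih =>
    simp only [pvALoop]
    split_ifs with h
    · ring
    · rw [ih (total + x) (count + 1), ih (total + x) (0 + 1)]; ring

-- B's while loop counts exactly what A's break-loop counts
lemma pvAux_snd (q : Int) (xs : List Int) (t c : Int) :
    (pvAux q xs t c).2 = c + pvALoop q xs t 0 := by
  induction xs generalizing t c with
  | nil => simp [pvAux, pvALoop]
  | cons x r ih =>
    simp only [pvAux, pvALoop]
    by_cases h : t + x ≤ q
    · rw [if_pos h, if_neg (show ¬t + x > q by omega), ih (t + x) (c + 1),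
        pvALoop_shift q r (t + x) (0 + 1)]
      ring
    · rw [if_neg h, if_pos (show t + x > q by omega)]
      simp

-- A's break-loop count is between 0 and len(xs)
lemma pvALoop_le_length (q : Int) (xs : List Int) (t : Int) :
    pvALoop q xs t 0 ≤ (xs.length : Int) ∧ 0 ≤ pvALoop q xs t 0 := by
  induction xs generalizing t with
  | nil => simp [pvALoop]
  | cons x r ih =>
    simp only [pvALoop, List.length_cons]
    by_cases h : t + x > q
    · rw [if_pos h]
      push_cast
      exact ⟨by omega, trivial⟩
    · rw [if_neg h, pvALoop_shift q r (t + x) (0 + 1)]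
      have := ih (t + x)
      push_cast
      omega

-- the fuel-indexed port computes pvAux on the remaining suffix
lemma pvSweep_eq_aux (ns : List Int) (q : Int) :
    ∀ (fuel : Nat) (t c : Int), 0 ≤ c → c.toNat ≤ ns.length →
      ns.length - c.toNat ≤ fuel →
      pvSweep ns q fuel t c = pvAux q (ns.drop c.toNat) t c := by
  intro fuel
  induction fuel with
  | zero =>
    intro t c hc hcl hf
    have : c.toNat = ns.length := by omega
    rw [pvSweep, this, List.drop_length, pvAux]
  | succ n ih =>
    intro t c hc hcl hf
    rw [pvSweep]
    by_cases hlt : c < (ns.length : Int)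
    · have hcn : c.toNat < ns.length := by omega
      have hget : PySem.List.pyGetD ns c 0 = ns[c.toNat] :=
        PySem.List.pyGetD_eq_getElem ns 0 hc (by omega)
      rw [hget, List.drop_eq_getElem_cons hcn]
      by_cases hle : t + ns[c.toNat] ≤ q
      · rw [if_pos ⟨hlt, hle⟩,
          ih (t + ns[c.toNat]) (c + 1) (by omega) (by omega) (by omega)]
        have h1 : (c + 1).toNat = c.toNat + 1 := by omega
        rw [h1]
        simp [pvAux, hle]
      · rw [if_neg (by tauto)]
        simp [pvAux, hle]
    · rw [if_neg (by tauto)]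
      have h2 : c.toNat = ns.length := by omega
      rw [h2, List.drop_length, pvAux]

-- restarting the sweep with a larger budget from where a smaller one stopped loses nothing
lemma pvAux_resume (q q' : Int) (h : q ≤ q') :
    ∀ (xs : List Int) (t c : Int), 0 ≤ c →
      pvAux q' (xs.drop ((pvAux q xs t c).2.toNat - c.toNat)) (pvAux q xs t c).1 (pvAux q xs t c).2
        = pvAux q' xs t c := by
  intro xs
  induction xs with
  | nil => intro t c _; simp [pvAux]
  | cons x r ih =>
    intro t c hc
    by_cases hx : t + x ≤ q
    · have h1 : pvAux q (x :: r) t c = pvAux q r (t + x) (c + 1) := by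
        simp [pvAux, hx]
      have hge := pvAux_count_ge q r (t + x) (c + 1)
      have hdrop : (pvAux q r (t + x) (c + 1)).2.toNat - c.toNat
          = ((pvAux q r (t + x) (c + 1)).2.toNat - (c + 1).toNat) + 1 := by omega
      rw [h1, hdrop, List.drop_succ_cons, ih (t + x) (c + 1) (by omega)]
      simp [pvAux, show t + x ≤ q' by omega]
    · have h1 : pvAux q (x :: r) t c = (t, c) := by simp [pvAux, hx]
      rw [h1]
      simp

-- the offline fold writes the from-scratch answer at every position
lemma pvSweep_fold (ns queries : List Int) :
    ∀ (L : List Int) (res : List Int) (t c : Int) (P : Int → Prop),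
      0 ≤ c → c.toNat ≤ ns.length →
      (∀ i ∈ L, P (PySem.List.pyGetD queries i 0)) →
      (∀ q', P q' → pvAux q' (ns.drop c.toNat) t c = pvAux q' ns 0 0) →
      L.Pairwise (fun i j => PySem.List.pyGetD queries i 0 ≤ PySem.List.pyGetD queries j 0) →
      (L.foldl (fun (st : List Int × Int × Int) i =>
          let q := PySem.List.pyGetD queries i 0
          let s := pvSweep ns q ns.length st.2.1 st.2.2
          (st.1.set i.toNat s.2, s.1, s.2)) (res, t, c)).1
        = L.foldl (fun r i =>
            r.set i.toNat ((pvAux (PySem.List.pyGetD queries i 0) ns 0 0).2)) res := by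
  intro L
  induction L with
  | nil => intro res t c P _ _ _ _ _; rfl
  | cons i L' ih =>
    intro res t c P hc hcl hP hstate hpar
    have hPq : P (PySem.List.pyGetD queries i 0) := hP i (by simp)
    have hs : pvSweep ns (PySem.List.pyGetD queries i 0) ns.length t c
        = pvAux (PySem.List.pyGetD queries i 0) ns 0 0 := by
      rw [pvSweep_eq_aux ns _ ns.length t c hc hcl (by omega)]
      exact hstate _ hPq
    simp only [List.foldl_cons]
    rw [hs]
    set q := PySem.List.pyGetD queries i 0 with hq
    set Pq := pvAux q ns 0 0 with hPqdef
    have hge : (0 : Int) ≤ Pq.2 := pvAux_count_ge q ns 0 0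
    have hle : Pq.2.toNat ≤ ns.length := by
      have h1 := pvALoop_le_length q ns 0
      have h2 := pvAux_snd q ns 0 0
      rw [← hPqdef] at h2
      omega
    rcases List.pairwise_cons.1 hpar with ⟨hhead, htail⟩
    exact ih (res.set i.toNat Pq.2) Pq.1 Pq.2 (fun q' => q ≤ q') hge hle
      (fun j hj => hhead j hj)
      (fun q' hq' => by
        have := pvAux_resume q q' hq' ns 0 0 (by omega)
        simpa using this)
      htail

-- writes at (nonnegative) indices other than j leave position j alone
lemma pvFoldSet_not_mem (g : Int → Int) :
    ∀ (L : List Int) (r0 : List Int) (j : Nat), (∀ i ∈ L, 0 ≤ i) → (↑j : Int) ∉ L →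
      (L.foldl (fun r i => r.set i.toNat (g i)) r0)[j]? = r0[j]? := by
  intro L
  induction L with
  | nil => intro r0 j _ _; rfl
  | cons i L' ih =>
    intro r0 j hpos hj
    simp only [List.mem_cons, not_or] at hj
    simp only [List.foldl_cons]
    rw [ih _ j (fun i hi => hpos i (by simp [hi])) hj.2, List.getElem?_set_ne]
    intro hij
    have h0 : (0 : Int) ≤ i := hpos i (by simp)
    exact hj.1 (by omega)

lemma pvFoldSet_length (g : Int → Int) :
    ∀ (L : List Int) (r0 : List Int),
      (L.foldl (fun r i => r.set i.toNat (g i)) r0).length = r0.length := by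
  intro L
  induction L with
  | nil => intro r0; rfl
  | cons i L' ih => intro r0; simp only [List.foldl_cons]; rw [ih]; simp

-- a position that is written gets g j (every write at j carries the same value g j)
lemma pvFoldSet_mem (g : Int → Int) :
    ∀ (L : List Int) (r0 : List Int) (j : Nat), (∀ i ∈ L, 0 ≤ i) → j < r0.length →
      (↑j : Int) ∈ L →
      (L.foldl (fun r i => r.set i.toNat (g i)) r0)[j]? = some (g ↑j) := by
  intro L
  induction L with
  | nil => intro r0 j _ _ hj; simp at hj
  | cons i L' ih =>
    intro r0 j hpos hlen hj
    simp only [List.foldl_cons]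
    by_cases hmem : (↑j : Int) ∈ L'
    · exact ih _ j (fun i hi => hpos i (by simp [hi])) (by simpa using hlen) hmem
    · have hij : i = (↑j : Int) := by
        rcases List.mem_cons.1 hj with h | h
        · exact h.symm
        · exact absurd h hmem
      rw [pvFoldSet_not_mem g L' _ j (fun i hi => hpos i (by simp [hi])) hmem, hij]
      simp [hlen]

-- ===== VERDICT (by name: the statement is the Claim_ definition above) =====
theorem solution_1651_4_spec : Claim_equal_solution_1651_4 := by
  intro nums queries _
  unfold Spec_solution_1651_4 solution_1651_4 solution_1651_4_alt
  simp only [PySem.List.foldl_append_singleton_eq_map, List.nil_append]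
  set ns := PySem.List.sorted nums (fun x => x) false with hns
  set order := PySem.List.sorted (PySem.List.pyRange 0 (queries.length : Int) 1)
                 (fun i => PySem.List.pyGetD queries i 0) false with horder
  rw [pvSweep_fold ns queries order _ 0 0 (fun _ => True) le_rfl (by simp)
    (fun _ _ => trivial) (fun q' _ => by simp)
    (PySem.List.sorted_pairwise _ _)]
  apply List.ext_getElem?
  intro j
  by_cases hj : j < queries.length
  · have hmem : (↑j : Int) ∈ order := by
      rw [horder, PySem.List.mem_sorted, PySem.List.mem_pyRange_one]
      constructor <;> omega
    have hpos : ∀ i ∈ order, (0 : Int) ≤ i := by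
      intro i hi
      rw [horder, PySem.List.mem_sorted, PySem.List.mem_pyRange_one] at hi
      exact hi.1
    rw [pvFoldSet_mem _ order _ j hpos (by simpa using hj) hmem,
      List.getElem?_map, List.getElem?_eq_getElem hj]
    have hget : PySem.List.pyGetD queries (↑j) 0 = queries[j] :=
      PySem.List.pyGetD_eq_getElem queries 0 (by omega) (by omega)
    simp only [Option.map_some]
    rw [hget, pvAux_snd]
    simp
  · rw [List.getElem?_eq_none (by simpa using hj),
      List.getElem?_eq_none]
    rw [pvFoldSet_length]
    simpa using hj
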